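-- pv_equiv track=rewrite | github.com/rrossinni-exelixis/openstudybuilder-solution | studybuilder-import/importers/run_import_dummydata.py | iter_one_visit_per_group
-- ===== SOURCE A (Python) =====
-- def iter_one_visit_per_group(visits):
--     """Iterates over visits dictionary yielding only the visits that are the first in their group or not grouped"""
--
--     last_group = None
--
--     for visit in visits:
--         if (
--             not visit["consecutive_visit_group"]
--             or visit["consecutive_visit_group"] != last_group
--         ):
--             last_group = visit["consecutive_visit_group"]
--             yield visit
-- ===== SOURCE B (Python) =====
-- def iter_one_visit_per_group(visits):
--     """Iterates over visits dictionary yielding only the visits that are the first in their group or not grouped"""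
--     visits = list(visits)
--     n = len(visits)
--     i = 0
--     while i < n:
--         key = visits[i]["consecutive_visit_group"]
--         j = i + 1
--         while j < n and visits[j]["consecutive_visit_group"] == key:
--             j += 1
--         if not key:
--             yield from visits[i:j]
--         else:
--             yield visits[i]
--         i = j
-- ===== Notes on version B (the rewrite author's own statement) =====
-- stated objective: alternative
-- what changed: Replaces A's per-element state machine (a last_group variable updated on each yield) with a per-run scan: B finds each maximal run of equal consecutive_visit_group values and yields the whole run if the key is falsy, else only its first visit.
import Mathlib
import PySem

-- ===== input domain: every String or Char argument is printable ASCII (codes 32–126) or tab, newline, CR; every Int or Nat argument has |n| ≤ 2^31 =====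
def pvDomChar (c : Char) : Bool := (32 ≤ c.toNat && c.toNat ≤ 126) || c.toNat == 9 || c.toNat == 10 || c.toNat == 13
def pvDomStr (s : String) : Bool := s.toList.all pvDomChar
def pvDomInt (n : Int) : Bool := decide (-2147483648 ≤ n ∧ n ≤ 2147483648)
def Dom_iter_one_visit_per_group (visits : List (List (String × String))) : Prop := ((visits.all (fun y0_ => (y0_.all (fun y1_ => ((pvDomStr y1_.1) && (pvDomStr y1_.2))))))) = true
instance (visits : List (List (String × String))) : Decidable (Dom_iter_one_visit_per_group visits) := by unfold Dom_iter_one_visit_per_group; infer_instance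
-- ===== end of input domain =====

-- B replaces A's last_group state machine with a per-run scan (find each maximal run of
-- equal group keys, yield the whole run if the key is falsy, else its first visit);
-- equivalence is proved on inputs where every visit carries the key (else A raises KeyError).

-- ===== PORT A =====
-- visit["consecutive_visit_group"]: first-match lookup in the association list
def pvKeyOf (v : List (String × String)) : Option String :=
  List.lookup "consecutive_visit_group" v

-- the loop of A: state = last_group (None → Option.none); `none` result case = KeyError, excluded by Pre_
def iterAGo (visits : List (List (String × String))) (last : Option String) :
    List (List (String × String)) :=
  match visits with
  | [] => []
  | v :: rest =>
    match pvKeyOf v with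
    | none => []  -- KeyError in Python; outside Pre_
    | some g =>
      if g = "" ∨ some g ≠ last then
        v :: iterAGo rest (some g)
      else
        iterAGo rest last

def iter_one_visit_per_group (visits : List (List (String × String))) :
    List (List (String × String)) :=
  iterAGo visits none

-- ===== PORT B =====
-- B scans the maximal run of visits sharing the head's key (the inner `while j < n and …` loop
-- is takeWhile/dropWhile on the same predicate), then emits per run.
def iter_one_visit_per_group_alt (visits : List (List (String × String))) :
    List (List (String × String)) :=
  match visits with
  | [] => []
  | v :: rest =>
    match pvKeyOf v with
    | none => []  -- KeyError in Python; outside Pre_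
    | some k =>
      (if k = "" then v :: rest.takeWhile (fun w => pvKeyOf w == some k) else [v])
        ++ iter_one_visit_per_group_alt (rest.dropWhile (fun w => pvKeyOf w == some k))
  termination_by visits.length
  decreasing_by
    simp only [List.length_cons]
    exact Nat.lt_succ_of_le (List.length_dropWhile_le _ _)

-- ===== PRECONDITION & SPEC =====
-- Pre_ excludes exactly the inputs where some visit lacks the "consecutive_visit_group" key,
-- on which Python A raises KeyError (B raises there too).
def Pre_iter_one_visit_per_group (visits : List (List (String × String))) : Prop :=
  ∀ v ∈ visits, (List.lookup "consecutive_visit_group" v).isSome = true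
instance (visits : List (List (String × String))) : Decidable (Pre_iter_one_visit_per_group visits) := by unfold Pre_iter_one_visit_per_group; infer_instance

def pvWitness_iter_one_visit_per_group : (List (List (String × String))) :=
  [[("consecutive_visit_group", "g1"), ("name", "V1")],
   [("consecutive_visit_group", "g1")],
   [("consecutive_visit_group", "")],
   [("consecutive_visit_group", "")],
   [("consecutive_visit_group", "g2")]]

def Spec_iter_one_visit_per_group (visits : List (List (String × String))) (out : List (List (String × String))) : Prop := out = iter_one_visit_per_group_alt visits
instance (visits : List (List (String × String))) (out : List (List (String × String))) : Decidable (Spec_iter_one_visit_per_group visits out) := by unfold Spec_iter_one_visit_per_group; infer_instance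

-- ===== CLAIM (what is proved, stated in full; the proofs are below) =====
def Claim_equal_iter_one_visit_per_group : Prop := ∀ (visits : List (List (String × String))), Dom_iter_one_visit_per_group visits → Pre_iter_one_visit_per_group visits → Spec_iter_one_visit_per_group visits (iter_one_visit_per_group visits)

-- ===== LEMMAS AND PROOFS =====

-- an empty-key visit prepended to a list just prepends to B's output
theorem alt_cons_empty (v : List (String × String)) (rest : List (List (String × String)))
    (hv : pvKeyOf v = some "") :
    iter_one_visit_per_group_alt (v :: rest) = v :: iter_one_visit_per_group_alt rest := by
  match rest with
  | [] => simp [iter_one_visit_per_group_alt, hv]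
  | w :: ws =>
    rcases hw : pvKeyOf w with _ | h
    · simp [iter_one_visit_per_group_alt, hv, hw]
    · by_cases hh : h = ""
      · subst hh
        simp [iter_one_visit_per_group_alt, hv, hw]
      · have hne : (pvKeyOf w == some "") = false := by simp [hw, hh]
        simp [iter_one_visit_per_group_alt, hv, hw, hh]

-- the main invariant, proved by strong induction on length:
-- with state none or some "" A's loop agrees with B; with state some k (k ≠ "")
-- A's loop agrees with B applied after dropping the leading key-k run.
theorem main_inv (n : ℕ) : ∀ (xs : List (List (String × String))), xs.length ≤ n →
    Pre_iter_one_visit_per_group xs →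
    (iterAGo xs none = iter_one_visit_per_group_alt xs) ∧
    (iterAGo xs (some "") = iter_one_visit_per_group_alt xs) ∧
    (∀ k, k ≠ "" → iterAGo xs (some k) =
      iter_one_visit_per_group_alt (xs.dropWhile (fun w => pvKeyOf w == some k))) := by
  induction n with
  | zero =>
    intro xs hlen _
    have : xs = [] := List.length_eq_zero_iff.mp (Nat.le_zero.mp hlen)
    subst this
    exact ⟨by simp [iterAGo, iter_one_visit_per_group_alt], by simp [iterAGo, iter_one_visit_per_group_alt],
      fun k _ => by simp [iterAGo, iter_one_visit_per_group_alt]⟩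
  | succ n ih =>
    intro xs hlen hpre
    match xs with
    | [] => exact ⟨by simp [iterAGo, iter_one_visit_per_group_alt], by simp [iterAGo, iter_one_visit_per_group_alt],
        fun k _ => by simp [iterAGo, iter_one_visit_per_group_alt]⟩
    | v :: rest =>
      have hv : (pvKeyOf v).isSome = true := hpre v (by simp)
      rcases hg : pvKeyOf v with _ | g
      · rw [hg] at hv; simp at hv
      have hrest : Pre_iter_one_visit_per_group rest := fun w hw => hpre w (by simp [hw])
      have hlen' : rest.length ≤ n := by simpa using hlen
      -- the common "yield v then continue with state some g" computation
      have hbody : v :: iterAGo rest (some g) = iter_one_visit_per_group_alt (v :: rest) := by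
        by_cases hge : g = ""
        · subst hge
          rw [alt_cons_empty v rest hg, (ih rest hlen' hrest).2.1]
        · rw [(ih rest hlen' hrest).2.2 g hge]
          simp [iter_one_visit_per_group_alt, hg, hge]
      refine ⟨?_, ?_, ?_⟩
      · rw [show iterAGo (v :: rest) none = v :: iterAGo rest (some g) by
          simp [iterAGo, hg]]
        exact hbody
      · rw [show iterAGo (v :: rest) (some "") = v :: iterAGo rest (some g) by
          by_cases hge : g = "" <;> simp [iterAGo, hg, hge]]
        exact hbody
      · intro k hk
        by_cases hgk : g = k
        · subst hgk
          have h1 : iterAGo (v :: rest) (some g) = iterAGo rest (some g) := by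
            simp [iterAGo, hg, hk]
          have h2 : (pvKeyOf v == some g) = true := by simp [hg]
          rw [h1, (ih rest hlen' hrest).2.2 g hk]
          simp [h2]
        · have h1 : iterAGo (v :: rest) (some k) = v :: iterAGo rest (some g) := by
            simp [iterAGo, hg, hgk]
          have h2 : (pvKeyOf v == some k) = false := by simp [hg, hgk]
          rw [h1, List.dropWhile_cons, h2]
          simpa using hbody

-- ===== VERDICT (by name: the statement is the Claim_ definition above) =====
theorem iter_one_visit_per_group_spec : Claim_equal_iter_one_visit_per_group := by
  intro visits _ hpre
  unfold Spec_iter_one_visit_per_group iter_one_visit_per_group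
  exact (main_inv visits.length visits le_rfl hpre).1
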